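-- pv_equiv track=rewrite | github.com/sonambharti/Interview | Amazon/7March2026/Q1-getMinOperations.py | getMinOperations
-- ===== SOURCE A (Python) =====
-- def getMinOperations(operation, stockLevel):
--     n = len(operation)
--     m = len(stockLevel)
--
--     last = [-1] * m
--
--     for i, op in enumerate(operation):
--         if op > 0 and op <= m:
--             last[op - 1] = i
--
--     for i in range(m):
--         if last[i] == -1:
--             return -1
--
--     tasks = [(last[i], stockLevel[i]) for i in range(m)]
--     tasks.sort()
--
--     used = 0
--
--     for deadline, stock in tasks:
--         # operations available before deadline
--         available = deadline - used
--
--         if available < stock: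
--             return -1
--
--         used += stock + 1  # decrements + mark
--
--     return used
-- ===== SOURCE B (Python) =====
-- def getMinOperations(operation, stockLevel):
--     n = len(operation)
--     m = len(stockLevel)
--
--     last = [-1] * m
--     for i, op in enumerate(operation):
--         if 0 < op <= m:
--             last[op - 1] = i
--
--     # scatter each task into a bucket indexed by its deadline (deadlines are
--     # distinct list indices), validating as we go; this replaces the sort.
--     bucket = [None] * n
--     for j in range(m):
--         d = last[j]
--         if d == -1:
--             return -1
--         bucket[d] = stockLevel[j]
--
--     used = 0
--     for d in range(n):
--         s = bucket[d]
--         if s is not None: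
--             if d - used < s:
--                 return -1
--             used += s + 1
--     return used
-- ===== Notes on version B (the rewrite author's own statement) =====
-- stated objective: alternative
-- what changed: The build-and-sort of (deadline, stock) tasks is replaced by scattering each stock level into a bucket array indexed by its deadline (deadlines are distinct list indices) and running the greedy check over the buckets in index order, so the comparison sort disappears.
import Mathlib
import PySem

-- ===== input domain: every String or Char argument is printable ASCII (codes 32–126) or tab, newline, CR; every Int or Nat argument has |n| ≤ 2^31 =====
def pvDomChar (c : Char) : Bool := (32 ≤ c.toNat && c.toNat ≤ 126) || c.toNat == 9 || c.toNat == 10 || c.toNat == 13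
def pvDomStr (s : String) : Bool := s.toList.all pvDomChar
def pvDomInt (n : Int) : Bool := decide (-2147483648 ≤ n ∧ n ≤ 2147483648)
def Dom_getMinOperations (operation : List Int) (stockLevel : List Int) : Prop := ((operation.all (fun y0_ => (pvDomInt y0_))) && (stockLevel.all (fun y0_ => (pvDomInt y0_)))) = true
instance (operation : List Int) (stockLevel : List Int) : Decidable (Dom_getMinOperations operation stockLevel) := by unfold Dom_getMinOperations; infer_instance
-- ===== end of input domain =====

-- B replaces A's build-and-sort of (deadline, stock) tasks by a positional scatter into a
-- deadline-indexed bucket array scanned in order (deadlines are distinct indices); objective: alternative.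


-- ===== PORT A =====
-- 'for i, op in enumerate(operation): if op > 0 and op <= m: last[op-1] = i'
-- (the index op-1 is guarded to be in [0, m), so .toNat is exact here)
def pvLastA (operation : List Int) (m : Nat) : List Int :=
  (PySem.List.enumerate operation).foldl
    (fun last iop =>
      if iop.2 > 0 ∧ iop.2 ≤ (m : Int) then last.set (iop.2 - 1).toNat iop.1 else last)
    (List.replicate m (-1))

-- 'for deadline, stock in tasks: available = deadline - used; if available < stock: return -1; used += stock + 1'
def pvGreedyA : List (Int × Int) → Int → Int
  | [], used => used
  | (d, s) :: rest, used => if d - used < s then -1 else pvGreedyA rest (used + s + 1)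

def getMinOperations (operation : List Int) (stockLevel : List Int) : Int :=
  let m := stockLevel.length
  let last := pvLastA operation m
  -- 'for i in range(m): if last[i] == -1: return -1' (last has length m)
  if last.any (fun x => x == -1) then -1
  else
    -- 'tasks = [(last[i], stockLevel[i]) for i in range(m)]; tasks.sort()'
    let tasks := PySem.List.sorted2 (last.zip stockLevel) Prod.fst Prod.snd
    pvGreedyA tasks 0

-- ===== PORT B =====
-- Source B's first loop is character-for-character A's first loop, so its port is pvLastA (shared)

-- 'for j in range(m): d = last[j]; if d == -1: return -1; bucket[d] = stockLevel[j]'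
-- (d is a valid index when it is not -1, so .toNat is exact here)
def pvScatterB : List (Int × Int) → List (Option Int) → Option (List (Option Int))
  | [], bucket => some bucket
  | (d, s) :: rest, bucket =>
      if d == -1 then none else pvScatterB rest (bucket.set d.toNat (some s))

-- 'for d in range(n): s = bucket[d]; if s is not None: …'
def pvGreedyB : List (Option Int) → Int → Int → Int
  | [], _, used => used
  | none :: rest, d, used => pvGreedyB rest (d + 1) used
  | some s :: rest, d, used =>
      if d - used < s then -1 else pvGreedyB rest (d + 1) (used + s + 1)

def getMinOperations_alt (operation : List Int) (stockLevel : List Int) : Int :=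
  let n := operation.length
  let m := stockLevel.length
  let last := pvLastA operation m
  match pvScatterB (last.zip stockLevel) (List.replicate n none) with
  | none => -1
  | some bucket => pvGreedyB bucket 0 0

-- ===== PRECONDITION & SPEC =====
def Spec_getMinOperations (operation : List Int) (stockLevel : List Int) (out : Int) : Prop := out = getMinOperations_alt operation stockLevel
instance (operation : List Int) (stockLevel : List Int) (out : Int) : Decidable (Spec_getMinOperations operation stockLevel out) := by unfold Spec_getMinOperations; infer_instance

-- ===== CLAIM (what is proved, stated in full; the proofs are below) =====
def Claim_equal_getMinOperations : Prop := ∀ (operation : List Int) (stockLevel : List Int), Dom_getMinOperations operation stockLevel → Spec_getMinOperations operation stockLevel (getMinOperations operation stockLevel)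

-- ===== LEMMAS AND PROOFS =====

-- `extract bucket d` lists the present (deadline, stock) pairs of the bucket array in index order
def pvExtract : List (Option Int) → Int → List (Int × Int)
  | [], _ => []
  | none :: rest, d => pvExtract rest (d + 1)
  | some s :: rest, d => (d, s) :: pvExtract rest (d + 1)

theorem pvGreedyB_eq_greedyA (bucket : List (Option Int)) (d used : Int) :
    pvGreedyB bucket d used = pvGreedyA (pvExtract bucket d) used := by
  induction bucket generalizing d used with
  | nil => rfl
  | cons o rest ih =>
    cases o with
    | none => simp [pvGreedyB, pvExtract, ih]
    | some s =>
      simp only [pvGreedyB, pvExtract, pvGreedyA]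
      split_ifs <;> simp [ih]

theorem pvExtract_mem_fst_ge (bucket : List (Option Int)) (d : Int) :
    ∀ p ∈ pvExtract bucket d, d ≤ p.1 := by
  induction bucket generalizing d with
  | nil => intro p hp; simp [pvExtract] at hp
  | cons o rest ih =>
    intro p hp
    cases o with
    | none =>
      have := ih (d + 1) p (by simpa [pvExtract] using hp)
      omega
    | some s =>
      simp only [pvExtract, List.mem_cons] at hp
      rcases hp with rfl | hp
      · simp
      · have := ih (d + 1) p hp; omega

theorem pvExtract_pairwise (bucket : List (Option Int)) (d : Int) :
    (pvExtract bucket d).Pairwise (fun a b => a.1 < b.1) := by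
  induction bucket generalizing d with
  | nil => exact List.Pairwise.nil
  | cons o rest ih =>
    cases o with
    | none => simpa [pvExtract] using ih (d + 1)
    | some s =>
      simp only [pvExtract]
      refine List.Pairwise.cons ?_ (ih (d + 1))
      intro p hp
      have := pvExtract_mem_fst_ge rest (d + 1) p hp
      omega

theorem pvExtract_set_perm (bucket : List (Option Int)) (k : Nat) (s : Int) (d : Int)
    (hk : k < bucket.length) (hnone : bucket[k] = none) :
    (pvExtract (bucket.set k (some s)) d).Perm ((d + (k : Int), s) :: pvExtract bucket d) := by
  induction bucket generalizing k d with
  | nil => simp at hk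
  | cons o rest ih =>
    cases k with
    | zero =>
      simp at hnone
      subst hnone
      simp [pvExtract]
    | succ k' =>
      simp at hnone hk
      have hk' : k' < rest.length := by simpa using hk
      cases o with
      | none =>
        simp only [List.set, pvExtract]
        have := ih k' (d + 1) hk' hnone
        have harith : d + 1 + (k' : Int) = d + ((k' + 1 : Nat) : Int) := by push_cast; ring
        rw [harith] at this
        exact this
      | some t =>
        simp only [List.set, pvExtract]
        have := ih k' (d + 1) hk' hnone
        have harith : d + 1 + (k' : Int) = d + ((k' + 1 : Nat) : Int) := by push_cast; ring
        rw [harith] at this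
        exact (this.cons (d, t)).trans (List.Perm.swap _ _ _)

-- scatter returns none exactly when some deadline is -1
theorem pvScatterB_eq_none_iff (l : List (Int × Int)) (b : List (Option Int)) :
    pvScatterB l b = none ↔ ∃ p ∈ l, p.1 = -1 := by
  induction l generalizing b with
  | nil => simp [pvScatterB]
  | cons p rest ih =>
    obtain ⟨d, s⟩ := p
    simp only [pvScatterB]
    split_ifs with h
    · simp at h; simp [h]
    · simp at h
      simp [ih, h]

-- when scatter succeeds: the extraction of the result is, up to permutation, the scattered
-- pairs plus the extraction of the initial bucket
theorem pvScatterB_extract (l : List (Int × Int)) (b b' : List (Option Int))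
    (hset : ∀ p ∈ l, 0 ≤ p.1 ∧ p.1.toNat < b.length ∧ b[p.1.toNat]! = none)
    (hdis : l.Pairwise (fun p q => p.1 ≠ q.1))
    (h : pvScatterB l b = some b') :
    (pvExtract b' 0).Perm (l ++ pvExtract b 0) := by
  induction l generalizing b with
  | nil =>
    simp [pvScatterB] at h
    subst h; simp
  | cons p rest ih =>
    obtain ⟨d, s⟩ := p
    obtain ⟨hd0, hdlt, hdnone⟩ := hset (d, s) (List.mem_cons_self)
    simp only [pvScatterB] at h
    have hdne : ¬ (d == -1) = true := by simp; omega
    rw [if_neg hdne] at h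
    have hdnone' : b[d.toNat] = none := by
      rwa [getElem!_pos b d.toNat hdlt] at hdnone
    have hset' : ∀ q ∈ rest, 0 ≤ q.1 ∧ q.1.toNat < (b.set d.toNat (some s)).length ∧
        (b.set d.toNat (some s))[q.1.toNat]! = none := by
      intro q hq
      obtain ⟨hq0, hqlt, hqnone⟩ := hset q (List.mem_cons_of_mem _ hq)
      have hne : q.1.toNat ≠ d.toNat := by
        intro hEq
        have : d ≠ q.1 := (List.pairwise_cons.1 hdis).1 q hq
        omega
      refine ⟨hq0, by simpa using hqlt, ?_⟩
      rw [getElem!_pos _ _ (by simpa using hqlt)] at hqnone ⊢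
      rwa [List.getElem_set_ne (by omega)]
    have hperm := ih (b.set d.toNat (some s)) hset' (List.pairwise_cons.1 hdis).2 h
    have hins := pvExtract_set_perm b d.toNat s 0 hdlt hdnone'
    have hd' : (0 : Int) + (d.toNat : Int) = d := by omega
    rw [hd'] at hins
    exact hperm.trans ((hins.append_left rest).trans List.perm_middle)

-- congruence for insertBy: predicates agreeing on the involved elements give equal results
theorem pvInsertBy_congr {α : Type} (p q : α → α → Bool) (x : α) (acc : List α)
    (h : ∀ b ∈ acc, p x b = q x b) :
    PySem.List.insertBy p x acc = PySem.List.insertBy q x acc := by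
  induction acc with
  | nil => rfl
  | cons y ys ih =>
    simp only [PySem.List.insertBy]
    rw [h y List.mem_cons_self]
    split_ifs with hb
    · rfl
    · rw [ih (fun b hb => h b (List.mem_cons_of_mem _ hb))]

theorem pvInsertBy_mem {α : Type} (p : α → α → Bool) (x : α) (acc : List α) :
    ∀ y ∈ PySem.List.insertBy p x acc, y = x ∨ y ∈ acc := by
  intro y hy
  have := (PySem.List.mem_insertBy (before := p) (x := x) (ys := acc) (y := y)).1 hy
  exact this

-- on a list whose first components are pairwise distinct, sorting by the tuple equals sorting by the first component
theorem pvSorted2_eq_sorted_fst (xs : List (Int × Int))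
    (hinj : ∀ a ∈ xs, ∀ b ∈ xs, a.1 = b.1 → a = b) :
    PySem.List.sorted2 xs Prod.fst Prod.snd = PySem.List.sorted xs Prod.fst := by
  rw [PySem.List.sorted_eq_foldl_insertBy]
  show List.foldl (fun acc x => PySem.List.insertBy
      (fun a b => decide (a.1 < b.1) || (!decide (b.1 < a.1) && decide (a.2 < b.2))) x acc) [] xs
    = List.foldl (fun acc x => PySem.List.insertBy (fun a b => decide (a.1 < b.1)) x acc) [] xs
  have key : ∀ (l acc : List (Int × Int)), (∀ y ∈ acc, y ∈ xs) → (∀ y ∈ l, y ∈ xs) →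
      List.foldl (fun acc x => PySem.List.insertBy
        (fun a b => decide (a.1 < b.1) || (!decide (b.1 < a.1) && decide (a.2 < b.2))) x acc) acc l
      = List.foldl (fun acc x => PySem.List.insertBy (fun a b => decide (a.1 < b.1)) x acc) acc l := by
    intro l
    induction l with
    | nil => intro acc _ _; rfl
    | cons x t ih =>
      intro acc hacc hl
      have hx : x ∈ xs := hl x List.mem_cons_self
      simp only [List.foldl_cons]
      rw [pvInsertBy_congr _ _ x acc ?_]
      · refine ih _ ?_ (fun y hy => hl y (List.mem_cons_of_mem _ hy))
        intro y hy
        rcases pvInsertBy_mem _ x acc y hy with rfl | hmem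
        · exact hx
        · exact hacc y hmem
      · intro b hb
        have hbx : b ∈ xs := hacc b hb
        by_cases h1 : x.1 < b.1
        · simp [h1]
        · by_cases h2 : b.1 < x.1
          · simp [h1, h2]
          · have : x.1 = b.1 := by omega
            have : x = b := hinj x hx b hbx this
            subst this
            simp
  exact key xs [] (by simp) (fun y hy => hy)

-- characterisation of the last-array built by the first loop
theorem pvLast_length (m : Nat) (l : List (Int × Int)) (init : List Int) :
    (l.foldl (fun last iop =>
      if iop.2 > 0 ∧ iop.2 ≤ (m : Int) then last.set (iop.2 - 1).toNat iop.1 else last)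
      init).length = init.length := by
  induction l generalizing init with
  | nil => rfl
  | cons p rest ih =>
    simp only [List.foldl_cons]
    split_ifs
    · rw [ih]; simp
    · exact ih init

theorem pvLast_char (operation : List Int) (m : Nat) (l : List (Int × Int)) (init : List Int)
    (hl : ∀ p ∈ l, ∃ k : Nat, p.1 = (k : Int) ∧ operation[k]? = some p.2)
    (hinit : ∀ j, j < init.length →
      init[j]! = -1 ∨ ∃ k : Nat, init[j]! = (k : Int) ∧ operation[k]? = some ((j : Int) + 1)) :
    ∀ j, j < init.length →
      (l.foldl (fun last iop =>
        if iop.2 > 0 ∧ iop.2 ≤ (m : Int) then last.set (iop.2 - 1).toNat iop.1 else last)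
        init)[j]! = -1 ∨
      ∃ k : Nat, (l.foldl (fun last iop =>
        if iop.2 > 0 ∧ iop.2 ≤ (m : Int) then last.set (iop.2 - 1).toNat iop.1 else last)
        init)[j]! = (k : Int) ∧ operation[k]? = some ((j : Int) + 1) := by
  induction l generalizing init with
  | nil => exact hinit
  | cons p rest ih =>
    obtain ⟨i, op⟩ := p
    simp only [List.foldl_cons]
    split_ifs with hg
    · intro j hj
      refine ih (init.set (op - 1).toNat i) (fun q hq => hl q (List.mem_cons_of_mem _ hq)) ?_ j (by simpa using hj)
      clear hj
      intro j hj
      have hj' : j < init.length := by simpa using hj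
      by_cases hje : j = (op - 1).toNat
      · subst hje
        right
        obtain ⟨k, hk1, hk2⟩ := hl (i, op) List.mem_cons_self
        refine ⟨k, ?_, ?_⟩
        · rw [getElem!_pos (init.set (op - 1).toNat i) ((op - 1).toNat) hj, List.getElem_set_self]
          exact hk1
        · have hop : op = ((op - 1).toNat : Int) + 1 := by omega
          rw [← hop]; exact hk2
      · have hsame : (init.set (op - 1).toNat i)[j]! = init[j]! := by
          rw [getElem!_pos (init.set (op - 1).toNat i) j hj, getElem!_pos init j hj',
            List.getElem_set_ne (by omega)]
        rw [hsame]
        exact hinit j hj'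
    · exact fun j hj => ih init (fun q hq => hl q (List.mem_cons_of_mem _ hq)) hinit j (by simpa using hj)

theorem pvLastA_length (operation : List Int) (m : Nat) : (pvLastA operation m).length = m := by
  unfold pvLastA
  rw [pvLast_length]; simp

theorem pvLastA_spec (operation : List Int) (m : Nat) :
    ∀ j, j < m → (pvLastA operation m)[j]! = -1 ∨
      ∃ k : Nat, (pvLastA operation m)[j]! = (k : Int) ∧ operation[k]? = some ((j : Int) + 1) := by
  intro j hj
  unfold pvLastA
  refine pvLast_char operation m (PySem.List.enumerate operation) (List.replicate m (-1)) ?_ ?_ j (by simpa using hj)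
  · intro p hp
    rw [PySem.List.mem_enumerate_iff] at hp
    obtain ⟨k, hk, rfl⟩ := hp
    exact ⟨k, by simp, by simp⟩
  · intro j hj
    left
    rw [getElem!_pos (List.replicate m (-1 : Int)) j hj, List.getElem_replicate]

theorem pvExtract_replicate (n : Nat) (d : Int) :
    pvExtract (List.replicate n (none : Option Int)) d = [] := by
  induction n generalizing d with
  | zero => rfl
  | succ k ih => simpa [List.replicate, pvExtract] using ih (d + 1)

theorem getMinOperations_spec' : ∀ (operation : List Int) (stockLevel : List Int),
    getMinOperations operation stockLevel = getMinOperations_alt operation stockLevel := by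
  intro operation stockLevel
  set m := stockLevel.length with hm
  set n := operation.length with hn
  set last := pvLastA operation m with hlast
  have hlen : last.length = m := pvLastA_length operation m
  have hchar := pvLastA_spec operation m
  simp only [getMinOperations, getMinOperations_alt, ← hlast, ← hm, ← hn]
  by_cases hany : last.any (fun x => x == -1)
  · -- some deadline missing: both return -1
    rw [if_pos hany]
    obtain ⟨x, hx, hx1⟩ := List.any_eq_true.1 hany
    have hx1 : x = -1 := by simpa using hx1
    obtain ⟨j, hjlt, hjx⟩ := List.mem_iff_getElem.1 hx
    have hsc : pvScatterB (last.zip stockLevel) (List.replicate n none) = none := by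
      rw [pvScatterB_eq_none_iff]
      have hjz : j < (last.zip stockLevel).length := by
        rw [List.length_zip]; omega
      refine ⟨(last.zip stockLevel)[j]'hjz, List.getElem_mem _, ?_⟩
      rw [List.getElem_zip]
      simpa [hjx] using hx1
    rw [hsc]
  · rw [if_neg hany]
    have hno : ∀ x ∈ last, x ≠ -1 := by
      intro x hx hx1
      exact hany (List.any_eq_true.2 ⟨x, hx, by simp [hx1]⟩)
    -- every entry of last names a valid, unique operation index
    have hiv : ∀ j, (hj : j < m) → ∃ k : Nat, last[j]'(by omega) = (k : Int) ∧
        k < n ∧ operation[k]? = some ((j : Int) + 1) := by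
      intro j hj
      rcases hchar j hj with h1 | ⟨k, hk1, hk2⟩
      · exact absurd (by rw [← getElem!_pos (pvLastA operation m) j (by rw [pvLastA_length]; exact hj)]; exact h1)
          (hno _ (List.getElem_mem _))
      · refine ⟨k, by rw [← getElem!_pos (pvLastA operation m) j (by rw [pvLastA_length]; exact hj)]; exact hk1, ?_, hk2⟩
        exact (List.getElem?_eq_some_iff.1 hk2).choose
    set tasks := last.zip stockLevel with htasks
    have hlt : tasks.length = m := by rw [htasks, List.length_zip]; omega
    have htget : ∀ j, (hj : j < m) → tasks[j]'(by omega) = (last[j]'(by omega), stockLevel[j]'(by omega)) := by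
      intro j hj
      simp [htasks, List.getElem_zip]
    -- distinct first components
    have hdis : tasks.Pairwise (fun p q => p.1 ≠ q.1) := by
      rw [List.pairwise_iff_getElem]
      intro a b ha hb hab
      have ha' : a < m := by omega
      have hb' : b < m := by omega
      rw [htget a ha', htget b hb']
      obtain ⟨ka, hka1, _, hka3⟩ := hiv a ha'
      obtain ⟨kb, hkb1, _, hkb3⟩ := hiv b hb'
      simp only [hka1, hkb1]
      intro hEq
      have : ka = kb := by exact_mod_cast hEq
      subst this
      rw [hka3] at hkb3
      have : (a : Int) + 1 = (b : Int) + 1 := by simpa using hkb3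
      omega
    -- scatter succeeds
    have hset : ∀ p ∈ tasks, 0 ≤ p.1 ∧ p.1.toNat < (List.replicate n (none : Option Int)).length ∧
        (List.replicate n (none : Option Int))[p.1.toNat]! = none := by
      intro p hp
      obtain ⟨j, hjlt, hjp⟩ := List.mem_iff_getElem.1 hp
      have hj' : j < m := by omega
      obtain ⟨k, hk1, hk2, _⟩ := hiv j hj'
      have hp1 : p.1 = (k : Int) := by rw [← hjp, htget j hj']; exact hk1
      refine ⟨by omega, by simp [hp1]; omega, ?_⟩
      rw [getElem!_pos _ _ (by simp [hp1]; omega), List.getElem_replicate]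
    cases hsc : pvScatterB tasks (List.replicate n none) with
    | none =>
      exfalso
      obtain ⟨p, hp, hp1⟩ := (pvScatterB_eq_none_iff _ _).1 hsc
      have := (hset p hp).1
      omega
    | some bucket =>
      -- extraction of the bucket is the sorted task list
      have hperm : (pvExtract bucket 0).Perm tasks := by
        have := pvScatterB_extract tasks (List.replicate n none) bucket hset hdis hsc
        simpa [pvExtract_replicate] using this
      have hsorted : PySem.List.sorted2 tasks Prod.fst Prod.snd = pvExtract bucket 0 := by
        rw [pvSorted2_eq_sorted_fst tasks ?_]
        · exact PySem.List.sorted_eq_of_perm_of_pairwise_lt _ _ _ hperm (pvExtract_pairwise bucket 0)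
        · intro a ha b hb hab
          rcases List.Perm.pairwise_iff (fun {x y} (h : x.1 ≠ y.1) => h.symm) (List.Perm.refl tasks) |>.mp hdis with _
          -- derive equality from distinctness of firsts
          obtain ⟨ja, hja, rfl⟩ := List.mem_iff_getElem.1 ha
          obtain ⟨jb, hjb, rfl⟩ := List.mem_iff_getElem.1 hb
          rcases Nat.lt_trichotomy ja jb with h | h | h
          · exact absurd hab ((List.pairwise_iff_getElem.1 hdis) ja jb hja hjb h)
          · subst h; rfl
          · exact absurd hab.symm ((List.pairwise_iff_getElem.1 hdis) jb ja hjb hja h)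
      simp only [hsorted, pvGreedyB_eq_greedyA]

-- ===== VERDICT (by name: the statement is the Claim_ definition above) =====
theorem getMinOperations_spec : Claim_equal_getMinOperations := by
  intro operation stockLevel _
  exact getMinOperations_spec' operation stockLevel
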